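-- pv_equiv track=rewrite | github.com/lior2114/all | 01 - lessions/חודש 03.2025/‏‏‏‏‏‏‏‏‏‏02.03.2025/test 2 with teacher/handle_digits.py | exist_digits
-- ===== SOURCE A (Python) =====
-- def exist_digits(n, digit):
--     if not isinstance(digit,int) or not isinstance(n,int):
--         raise ValueError ("enter only numbers!")
--     if digit > 9 or digit < 0:
--         raise ValueError ("digit is not between 0-9")
--     if n < 0:
--         n = -1*n # כי אם הוא קטן מ 0 אז מינוס כפול מינוס זה פלוס
--     counter = 0
--     for i in str(n): #123456 => "123456" הופך למחרוזת
--         if str(digit) == i:#2 => "2" #הופך למחרוזת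
--             counter += 1
--         if counter > 2:
--             return True
--     return False
-- ===== SOURCE B (Python) =====
-- def exist_digits(n, digit):
--     if not isinstance(digit, int) or not isinstance(n, int):
--         raise ValueError("enter only numbers!")
--     if digit > 9 or digit < 0:
--         raise ValueError("digit is not between 0-9")
--     if n < 0:
--         n = -n
--     counter = 0
--     while n:
--         if n % 10 == digit:
--             counter += 1
--             if counter > 2:
--                 return True
--         n //= 10
--     return False
-- ===== Notes on version B (the rewrite author's own statement) =====
-- stated objective: alternative
-- what changed: Counts the digit by arithmetic extraction (n % 10 / n //= 10) in a while loop instead of converting n and digit to strings and scanning the characters.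
import Mathlib
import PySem

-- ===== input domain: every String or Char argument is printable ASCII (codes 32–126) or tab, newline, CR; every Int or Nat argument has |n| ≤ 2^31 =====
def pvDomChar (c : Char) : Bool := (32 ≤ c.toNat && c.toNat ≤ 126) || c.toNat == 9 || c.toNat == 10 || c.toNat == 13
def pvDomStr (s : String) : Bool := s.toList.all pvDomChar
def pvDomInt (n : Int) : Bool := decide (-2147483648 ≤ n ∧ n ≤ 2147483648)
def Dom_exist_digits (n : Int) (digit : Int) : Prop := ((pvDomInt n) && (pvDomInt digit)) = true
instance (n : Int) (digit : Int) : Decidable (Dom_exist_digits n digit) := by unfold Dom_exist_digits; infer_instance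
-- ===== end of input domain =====

-- B replaces A's string-scan digit counting by arithmetic digit extraction (n % 10, n //= 10); alternative, same cost.


-- ===== PORT A =====
-- A's for-loop over str(n), comparing each character with str(digit)
def pvLoopA (ds : List Char) (cs : List Char) (counter : Nat) : Bool :=
  match cs with
  | [] => false
  | c :: rest =>
    let counter' := if ds == [c] then counter + 1 else counter
    if counter' > 2 then true else pvLoopA ds rest counter'

def exist_digits (n : Int) (digit : Int) : Bool :=
  let m := if n < 0 then -1 * n else n
  pvLoopA (PySem.Int.toChars digit) (PySem.Int.toChars m) 0

-- ===== PORT B =====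
-- B's while-loop extracting digits arithmetically
def pvLoopB (m : Nat) (digit : Int) (counter : Nat) : Bool :=
  if h : m = 0 then false
  else
    if ((m % 10 : Nat) : Int) = digit then
      let counter' := counter + 1
      if counter' > 2 then true else pvLoopB (m / 10) digit counter'
    else pvLoopB (m / 10) digit counter
decreasing_by all_goals exact Nat.div_lt_self (Nat.pos_of_ne_zero h) (by omega)

def exist_digits_alt (n : Int) (digit : Int) : Bool :=
  let m := if n < 0 then -n else n
  pvLoopB m.toNat digit 0

-- ===== PRECONDITION & SPEC =====
-- Pre_ excludes exactly the inputs on which A raises ValueError (digit outside 0..9).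
def Pre_exist_digits (n : Int) (digit : Int) : Prop := 0 ≤ digit ∧ digit ≤ 9
instance (n : Int) (digit : Int) : Decidable (Pre_exist_digits n digit) := by unfold Pre_exist_digits; infer_instance
def pvWitness_exist_digits : Int × Int := (-122232, 2)

def Spec_exist_digits (n : Int) (digit : Int) (out : Bool) : Prop := out = exist_digits_alt n digit
instance (n : Int) (digit : Int) (out : Bool) : Decidable (Spec_exist_digits n digit out) := by unfold Spec_exist_digits; infer_instance

-- ===== CLAIM (what is proved, stated in full; the proofs are below) =====
def Claim_equal_exist_digits : Prop := ∀ (n : Int) (digit : Int), Dom_exist_digits n digit → Pre_exist_digits n digit → Spec_exist_digits n digit (exist_digits n digit)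

-- ===== LEMMAS AND PROOFS =====

-- arithmetic count of decimal digits of m equal to digit (proof-only helper)
def pvCnt (m : Nat) (digit : Int) : Nat :=
  if h : m = 0 then 0
  else (if ((m % 10 : Nat) : Int) = digit then 1 else 0) + pvCnt (m / 10) digit
decreasing_by exact Nat.div_lt_self (Nat.pos_of_ne_zero h) (by omega)

lemma pvLoopB_eq (digit : Int) : ∀ m k, k ≤ 2 →
    pvLoopB m digit k = decide (3 ≤ k + pvCnt m digit) := by
  intro m
  induction m using Nat.strong_induction_on with
  | _ m ih =>
    intro k hk
    by_cases h0 : m = 0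
    · subst h0; simp [pvLoopB, pvCnt]; omega
    · rw [pvLoopB, pvCnt]
      simp only [h0, dite_false]
      have hlt : m / 10 < m := Nat.div_lt_self (Nat.pos_of_ne_zero h0) (by omega)
      by_cases hd : ((m % 10 : Nat) : Int) = digit
      · rw [if_pos hd, if_pos hd]
        by_cases hki : k + 1 > 2
        · rw [if_pos hki]
          have hk2 : k = 2 := by omega
          subst hk2
          symm
          rw [decide_eq_true_iff]
          omega
        · rw [if_neg hki]
          rw [ih _ hlt (k+1) (by omega)]
          rw [decide_eq_decide]
          omega
      · rw [if_neg hd, if_neg hd]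
        rw [ih _ hlt k hk]
        rw [decide_eq_decide]
        omega

lemma pvLoopA_eq (ds : List Char) : ∀ (cs : List Char) k, k ≤ 2 →
    pvLoopA ds cs k = decide (3 ≤ k + cs.countP (fun c => ds == [c])) := by
  intro cs
  induction cs with
  | nil => intro k hk; simp [pvLoopA]; omega
  | cons c rest ih =>
    intro k hk
    rw [pvLoopA]
    simp only [List.countP_cons]
    by_cases hm : (ds == [c]) = true
    · simp only [hm, if_true]
      by_cases hki : k + 1 > 2
      · rw [if_pos hki]
        have hk2 : k = 2 := by omega
        subst hk2
        symm
        rw [decide_eq_true_iff]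
        omega
      · rw [if_neg hki]
        rw [ih (k+1) (by omega)]
        rw [decide_eq_decide]
        omega
    · rw [Bool.not_eq_true] at hm
      simp only [hm, Bool.false_eq_true, if_false]
      have hk3 : ¬ (k > 2) := by omega
      rw [if_neg hk3]
      rw [ih k hk]
      rw [decide_eq_decide]
      omega

lemma pvDigitChar_inj (a b : Nat) (ha : a < 10) (hb : b < 10) :
    Nat.digitChar a = Nat.digitChar b ↔ a = b := by
  interval_cases a <;> interval_cases b <;> decide

lemma pvCore_count (digit : Int) (h0 : 0 ≤ digit) (h9 : digit ≤ 9) :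
    ∀ f n (acc : List Char), n < 10 ^ f → 0 < n →
    (Nat.toDigitsCore 10 f n acc).count (Nat.digitChar digit.toNat) =
      pvCnt n digit + acc.count (Nat.digitChar digit.toNat) := by
  intro f
  induction f with
  | zero => intro n acc hf hn; omega
  | succ f ih =>
    intro n acc hf hn
    rw [Nat.toDigitsCore]
    have hmatch : (Nat.digitChar (n % 10) = Nat.digitChar digit.toNat) ↔ ((n % 10 : Nat) : Int) = digit := by
      rw [pvDigitChar_inj _ _ (Nat.mod_lt _ (by omega)) (by omega)]
      omega
    have hcnt : pvCnt n digit = (if ((n % 10 : Nat) : Int) = digit then 1 else 0) + pvCnt (n / 10) digit := by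
      rw [pvCnt]
      simp only [Nat.pos_iff_ne_zero.mp hn, dite_false]
    by_cases hq : n / 10 = 0
    · rw [if_pos hq]
      rw [List.count_cons]
      rw [hcnt, hq]
      have hz : pvCnt 0 digit = 0 := by rw [pvCnt]; simp
      rw [hz]
      simp only [beq_iff_eq]
      by_cases hd : ((n % 10 : Nat) : Int) = digit
      · rw [if_pos (hmatch.mpr hd), if_pos hd]
        omega
      · rw [if_neg (fun h => hd (hmatch.mp h)), if_neg hd]
        omega
    · rw [if_neg hq]
      have hq' : 0 < n / 10 := Nat.pos_of_ne_zero hq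
      have hf' : n / 10 < 10 ^ f := by
        rw [Nat.div_lt_iff_lt_mul (show 0 < 10 by omega)]
        calc n < 10 ^ (f+1) := hf
        _ = 10 ^ f * 10 := by ring
      rw [ih (n/10) _ hf' hq']
      rw [List.count_cons]
      rw [hcnt]
      simp only [beq_iff_eq]
      by_cases hd : ((n % 10 : Nat) : Int) = digit
      · rw [if_pos (hmatch.mpr hd), if_pos hd]
        omega
      · rw [if_neg (fun h => hd (hmatch.mp h)), if_neg hd]
        omega

lemma pvCount_toDigits (digit : Int) (h0 : 0 ≤ digit) (h9 : digit ≤ 9) (n : Nat) (hn : 0 < n) :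
    (Nat.toDigits 10 n).count (Nat.digitChar digit.toNat) = pvCnt n digit := by
  rw [Nat.toDigits]
  rw [pvCore_count digit h0 h9 (n+1) n [] (by
    have h1 : n < 10 ^ n := Nat.lt_pow_self (by omega)
    have h2 : (10:Nat) ^ n ≤ 10 ^ (n+1) := Nat.pow_le_pow_right (by omega) (by omega)
    omega) hn]
  simp [List.count]

lemma pvToChars_digit (digit : Int) (h0 : 0 ≤ digit) (h9 : digit ≤ 9) :
    PySem.Int.toChars digit = [Nat.digitChar digit.toNat] := by
  interval_cases digit <;> decide

-- ===== VERDICT (by name: the statement is the Claim_ definition above) =====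
theorem exist_digits_spec : Claim_equal_exist_digits := by
  intro n digit _ hpre
  obtain ⟨h0, h9⟩ := hpre
  unfold Spec_exist_digits exist_digits exist_digits_alt
  dsimp only
  have hm : (if n < 0 then -1 * n else n) = (if n < 0 then -n else n) := by split <;> ring
  rw [hm]
  set M : Int := if n < 0 then -n else n with hM
  have hMnn : 0 ≤ M := by rw [hM]; split <;> omega
  have hMt : M = ((M.toNat : Nat) : Int) := by omega
  have htc : PySem.Int.toChars M = Nat.toDigits 10 M.toNat := by
    unfold PySem.Int.toChars
    rw [if_neg (by omega)]
  rw [htc, pvToChars_digit digit h0 h9]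
  rw [pvLoopA_eq _ _ 0 (by omega), pvLoopB_eq digit _ 0 (by omega)]
  have hcp : (Nat.toDigits 10 M.toNat).countP (fun c => [Nat.digitChar digit.toNat] == [c])
      = (Nat.toDigits 10 M.toNat).count (Nat.digitChar digit.toNat) := by
    rw [List.count]
    apply List.countP_congr
    intro c _
    cases h : (c == Nat.digitChar digit.toNat)
    · simp only [beq_eq_false_iff_ne, ne_eq] at h
      simp only [List.cons_beq_cons]
      have hgc : (Nat.digitChar digit.toNat == c) = false := by
        simp only [beq_eq_false_iff_ne, ne_eq]; exact fun hh => h hh.symm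
      simp [hgc]
    · simp only [beq_iff_eq] at h
      subst h
      simp
  rw [hcp]
  by_cases hz : M.toNat = 0
  · rw [hz]
    have h01 : Nat.toDigits 10 0 = ['0'] := by decide
    rw [h01]
    have hz0 : pvCnt 0 digit = 0 := by rw [pvCnt]; simp
    rw [hz0]
    have hle : (['0'] : List Char).count (Nat.digitChar digit.toNat) ≤ 1 :=
      le_trans List.count_le_length (by simp)
    rw [decide_eq_decide]
    omega
  · rw [pvCount_toDigits digit h0 h9 M.toNat (Nat.pos_of_ne_zero hz)]
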